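-- pv_equiv track=rewrite | github.com/newfull5/Programmers | 4주차_직업군 추천하기.py | solution
-- ===== SOURCE A (Python) =====
-- def solution(table, languages, preference):
--     diction = {}
--
--     for i in range(len(languages)):
--         diction[languages[i]] = preference[i]
--
--     answer = {}
--
--     for tab in table:
--         for i,v in enumerate(tab.split()):
--             if i == 0:
--                 lang = v
--                 answer[lang] = 0
--                 continue
--             if v in languages:
--                 answer[lang] += (diction[v] * (6-i))
--
--     answer = sorted(list(answer.items()), key = lambda x: (x[0]*10)[:10])
--
--     answer = sorted(answer, key = lambda x: x[-1], reverse=True)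
--
--     return answer[0][0]
-- ===== SOURCE B (Python) =====
-- def solution(table, languages, preference):
--     pref = {}
--     for lang, p in zip(languages, preference):
--         pref[lang] = p
--
--     scores = {}
--     for row in table:
--         toks = row.split()
--         if not toks:
--             continue
--         total = 0
--         for i, t in enumerate(toks[1:], 1):
--             if t in pref:
--                 total += pref[t] * (6 - i)
--         scores[toks[0]] = total
--
--     best = None
--     for name, sc in scores.items():
--         key = (-sc, (name * 10)[:10])
--         if best is None or key < best[0]:
--             best = (key, name)
--     return best[1]
-- ===== Notes on version B (the rewrite author's own statement) =====
-- stated objective: simpler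
-- what changed: B replaces A's two stable sorts of the score table by a single running-best pass over the dict items using the combined key (-score, (name*10)[:10]) with a strict comparison (first-seen wins on full ties), and builds the preference dict with zip instead of an index loop.
import Mathlib
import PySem

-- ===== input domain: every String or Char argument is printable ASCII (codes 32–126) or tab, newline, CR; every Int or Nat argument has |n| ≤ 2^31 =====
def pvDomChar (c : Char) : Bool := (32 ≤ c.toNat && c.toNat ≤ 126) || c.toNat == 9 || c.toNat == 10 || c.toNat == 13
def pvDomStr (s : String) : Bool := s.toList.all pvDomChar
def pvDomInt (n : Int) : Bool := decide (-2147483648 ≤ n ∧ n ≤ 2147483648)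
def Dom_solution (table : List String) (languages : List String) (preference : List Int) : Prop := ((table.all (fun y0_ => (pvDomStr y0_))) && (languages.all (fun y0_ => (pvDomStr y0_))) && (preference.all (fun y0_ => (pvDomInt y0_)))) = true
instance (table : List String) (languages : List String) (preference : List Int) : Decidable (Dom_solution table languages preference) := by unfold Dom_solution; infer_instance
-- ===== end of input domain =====

-- B replaces A's two stable sorts of the score table by a single running-best pass
-- (same scores, same tie-breaking); objective: simpler selection, no sorting.

-- shared key expression: Python's (name*10)[:10], used verbatim by both programs
def pvKeyRep (s : String) : String :=
  String.ofList (PySem.List.slice (PySem.List.pyRepeat s.toList 10) none (some 10))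

-- ===== PORT A =====
-- pyGetD is exact here: Pre_solution puts every index used by the range loop in range.
def solution (table : List String) (languages : List String) (preference : List Int) : String :=
  let diction : PySem.Dict String Int :=
    (PySem.List.pyRange 0 (languages.length : Int) 1).foldl
      (fun d i => d.insert (PySem.List.pyGetD languages i "") (PySem.List.pyGetD preference i 0))
      PySem.Dict.empty
  -- the state carries Python's `answer` dict and the loop variable `lang` ("" before first assignment)
  let st : PySem.Dict String Int × String :=
    table.foldl (fun st tab =>
      (PySem.List.enumerate (PySem.Str.split₀ tab) 0).foldl (fun st iv =>
        if iv.1 = 0 then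
          (st.1.insert iv.2 0, iv.2)
        else if iv.2 ∈ languages then
          -- answer[lang] += diction[v] * (6-i); lang is present, diction[v] exists under Pre_
          (st.1.insert st.2 (st.1.getD st.2 0 + diction.getD iv.2 0 * (6 - iv.1)), st.2)
        else st) st)
      (PySem.Dict.empty, "")
  let ans1 := PySem.List.sorted st.1.items (fun x => pvKeyRep x.1) false
  let ans2 := PySem.List.sorted ans1 (fun x => x.2) true
  match ans2 with
  | [] => ""            -- Python raises IndexError here; excluded by Pre_solution
  | p :: _ => p.1

-- ===== PORT B =====
def solution_alt (table : List String) (languages : List String) (preference : List Int) : String :=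
  let pref : PySem.Dict String Int :=
    (languages.zip preference).foldl (fun d p => d.insert p.1 p.2) PySem.Dict.empty
  let scores : PySem.Dict String Int :=
    table.foldl (fun sc row =>
      match PySem.Str.split₀ row with
      | [] => sc
      | name :: rest =>
        let total := (PySem.List.enumerate rest 1).foldl
          (fun tot it => if pref.contains it.2 then tot + pref.getD it.2 0 * (6 - it.1) else tot) 0
        sc.insert name total)
      PySem.Dict.empty
  -- single pass: running best under Python's tuple order on (-score, (name*10)[:10])
  let best : Option ((Int × String) × String) :=
    scores.items.foldl (fun b p =>
      match b with
      | none => some ((-p.2, pvKeyRep p.1), p.1)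
      | some ((bs, bk), bn) =>
        if -p.2 < bs ∨ (-p.2 = bs ∧ pvKeyRep p.1 < bk) then some ((-p.2, pvKeyRep p.1), p.1)
        else some ((bs, bk), bn))
      none
  match best with
  | none => ""          -- Python raises TypeError here; excluded by Pre_solution
  | some (_, n) => n

-- ===== PRECONDITION & SPEC =====
-- Pre_ is exactly A's return domain: preference must be at least as long as languages
-- (else preference[i] raises IndexError) and some table row must have a token
-- (else answer[0] raises IndexError).
def Pre_solution (table : List String) (languages : List String) (preference : List Int) : Prop :=
  languages.length ≤ preference.length ∧ ∃ t ∈ table, PySem.Str.split₀ t ≠ []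
instance (table : List String) (languages : List String) (preference : List Int) : Decidable (Pre_solution table languages preference) := by unfold Pre_solution; infer_instance

def pvWitness_solution : List String × List String × List Int :=
  (["python python java", "java java"], ["python", "java"], [5, 3])

def Spec_solution (table : List String) (languages : List String) (preference : List Int) (out : String) : Prop := out = solution_alt table languages preference
instance (table : List String) (languages : List String) (preference : List Int) (out : String) : Decidable (Spec_solution table languages preference out) := by unfold Spec_solution; infer_instance

-- ===== CLAIM (what is proved, stated in full; the proofs are below) =====
def Claim_equal_solution : Prop := ∀ (table : List String) (languages : List String) (preference : List Int), Dom_solution table languages preference → Pre_solution table languages preference → Spec_solution table languages preference (solution table languages preference)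

-- ===== LEMMAS AND PROOFS =====

def pvFMstep {α : Type} (s : α → Int) : Option α → α → Option α :=
  fun b x => match b with
  | none => some x
  | some c => if s c < s x then some x else some c

def pvFM {α : Type} (s : α → Int) (l : List α) : Option α := l.foldl (pvFMstep s) none

def pvPKstep {α κ : Type} [LinearOrder κ] (s : α → Int) (k : α → κ) : Option α → α → Option α :=
  fun b x => match b with
  | none => some x
  | some c => if s c < s x ∨ (s x = s c ∧ k x < k c) then some x else some c

theorem pvFM_foldl_some {α : Type} (s : α → Int) (l : List α) (a : α) :
    l.foldl (pvFMstep s) (some a) =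
      match pvFM s l with
      | none => some a
      | some m => if s a < s m then some m else some a := by
  induction l generalizing a with
  | nil => rfl
  | cons x t ih =>
    show t.foldl (pvFMstep s) (pvFMstep s (some a) x) = _
    have hfm : pvFM s (x :: t) = t.foldl (pvFMstep s) (some x) := rfl
    have hstep : pvFMstep s (some a) x = some (if s a < s x then x else a) := by
      simp only [pvFMstep]; split <;> simp_all
    rw [hstep, ih, hfm, ih x]
    rcases h : pvFM s t with _ | m <;> simp only []
    · split_ifs <;> simp_all
    · split_ifs <;> simp_all <;> omega

theorem pvFM_mem {α : Type} (s : α → Int) (l : List α) (m : α) (h : pvFM s l = some m) : m ∈ l := by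
  have key : ∀ (l : List α) (a m : α), l.foldl (pvFMstep s) (some a) = some m → m = a ∨ m ∈ l := by
    intro l
    induction l with
    | nil => intro a m h; simp at h; exact Or.inl h.symm
    | cons x t ih =>
      intro a m h
      have h' : t.foldl (pvFMstep s) (pvFMstep s (some a) x) = some m := h
      have hstep : pvFMstep s (some a) x = some (if s a < s x then x else a) := by
        simp only [pvFMstep]; split <;> simp_all
      rw [hstep] at h'
      rcases ih _ _ h' with h1 | h2
      · by_cases hc : s a < s x
        · simp [hc] at h1; simp [h1]
        · simp [hc] at h1; simp [h1]
      · simp [h2]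
  cases l with
  | nil => simp [pvFM] at h
  | cons x t =>
    rcases key t x m h with h1 | h2
    · simp [h1]
    · simp [h2]

theorem pvFoldl_some_ne_none {α : Type} (s : α → Int) (l : List α) (a : α) :
    l.foldl (pvFMstep s) (some a) ≠ none := by
  rw [pvFM_foldl_some]
  rcases pvFM s l with _ | m
  · simp
  · simp only []; split <;> simp

theorem pvInsertBy_cons {α : Type} (before : α → α → Bool) (x y : α) (t : List α) :
    PySem.List.insertBy before x (y :: t) =
      if before x y then x :: y :: t else y :: PySem.List.insertBy before x t := by
  simp [PySem.List.insertBy]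

theorem pvCore {α κ : Type} [LinearOrder κ] (s : α → Int) (k : α → κ) (ys : List α) (x : α)
    (hs : ys.Pairwise (fun a b => k a ≤ k b)) :
    pvFM s (PySem.List.insertBy (fun a b => decide (k a < k b)) x ys) =
      pvPKstep s k (pvFM s ys) x := by
  induction ys with
  | nil => rfl
  | cons y t ih =>
    rcases List.pairwise_cons.mp hs with ⟨hy, ht⟩
    rw [pvInsertBy_cons]
    by_cases hxy : k x < k y
    · simp only [hxy, decide_true, if_true]
      -- LHS = pvFM s (x :: y :: t)
      have l1 : pvFM s (x :: y :: t) = t.foldl (pvFMstep s) (pvFMstep s (some x) y) := rfl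
      have l2 : pvFM s (y :: t) = t.foldl (pvFMstep s) (some y) := rfl
      have hstep : pvFMstep s (some x) y = some (if s x < s y then y else x) := by
        simp only [pvFMstep]; split <;> simp_all
      rw [l1, hstep, pvFM_foldl_some]
      show _ = pvPKstep s k (pvFM s (y :: t)) x
      rw [l2, pvFM_foldl_some]
      rcases hm : pvFM s t with _ | m
      · simp only [pvPKstep, hxy]
        split_ifs <;> simp_all <;> first | rfl | omega | (exfalso; omega) | (intros; first | omega | (exfalso; omega))
      · have hkm : k x < k m := lt_of_lt_of_le hxy (hy m (pvFM_mem s t m hm))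
        simp only [pvPKstep]
        split_ifs <;> simp_all <;> first | rfl | omega | (exfalso; omega) | (intros; first | omega | (exfalso; omega))
    · simp only [hxy, decide_false, Bool.false_eq_true, if_false]
      -- LHS = pvFM s (y :: insertBy x t)
      have hyx : k y ≤ k x := le_of_not_gt hxy
      have hxy' : ¬ k x < k y := not_lt.mpr hyx
      have l1 : pvFM s (y :: PySem.List.insertBy (fun a b => decide (k a < k b)) x t)
          = (PySem.List.insertBy (fun a b => decide (k a < k b)) x t).foldl (pvFMstep s) (some y) := rfl
      have l2 : pvFM s (y :: t) = t.foldl (pvFMstep s) (some y) := rfl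
      rw [l1, pvFM_foldl_some, ih ht, l2, pvFM_foldl_some]
      rcases hm : pvFM s t with _ | m
      · -- t has no max: insertBy x t = [x] effectively; pvFM of it is some x
        have ht0 : t = [] := by
          cases t with
          | nil => rfl
          | cons a b =>
            exfalso
            exact pvFoldl_some_ne_none s b a (by simpa [pvFM, pvFMstep] using hm)
        subst ht0
        simp only [pvPKstep, pvFMstep]
        split_ifs <;> simp_all <;>
          first
            | rfl
            | omega
            | (exfalso; omega)
            | (intros; rcases ‹_ ∨ _› with _ | ⟨_, hk⟩ <;>
                first | omega | (exact absurd hk (not_lt.mpr hyx)))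
            | (simp only [not_lt.mpr hyx, and_false, or_false] <;>
               split_ifs <;> first | rfl | omega | (exfalso; omega))
      · have hym : k y ≤ k m := hy m (pvFM_mem s t m hm)
        simp only [pvPKstep, pvFMstep]
        split_ifs <;> simp_all <;>
          first
            | rfl
            | omega
            | (exfalso; omega)
            | (intros; rcases ‹_ ∨ _› with _ | ⟨_, hk⟩ <;>
                first | omega | (exact absurd hk (not_lt.mpr hyx)))
            | (simp only [not_lt.mpr hyx, and_false, or_false] <;>
               split_ifs <;> first | rfl | omega | (exfalso; omega))

theorem pvMain {α κ : Type} [LinearOrder κ] (s : α → Int) (k : α → κ) (l : List α) :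
    pvFM s (PySem.List.sorted l k false) = l.foldl (pvPKstep s k) none := by
  induction l using List.reverseRecOn with
  | nil => rfl
  | append_singleton l x ih =>
    have h1 : PySem.List.sorted (l ++ [x]) k false
        = PySem.List.insertBy (fun a b => decide (k a < k b)) x (PySem.List.sorted l k false) := by
      rw [PySem.List.sorted_eq_foldl_insertBy, PySem.List.sorted_eq_foldl_insertBy, List.foldl_append]
      rfl
    rw [h1, pvCore s k _ x (PySem.List.sorted_pairwise l k), ih, List.foldl_append]
    rfl

theorem pvHead_insertBy {α : Type} (before : α → α → Bool) (x : α) (ys : List α) :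
    (PySem.List.insertBy before x ys).head? =
      match ys with
      | [] => some x
      | y :: _ => if before x y then some x else some y := by
  cases ys with
  | nil => rfl
  | cons y t => rw [pvInsertBy_cons]; split <;> simp_all

theorem pvHead_foldl_insertBy {α : Type} (before : α → α → Bool) (l acc : List α) :
    (l.foldl (fun acc x => PySem.List.insertBy before x acc) acc).head? =
      l.foldl (fun b x => match b with
        | none => some x
        | some h => if before x h then some x else some h) acc.head? := by
  induction l generalizing acc with
  | nil => rfl
  | cons a l ih =>
    show (l.foldl _ (PySem.List.insertBy before a acc)).head? = _
    rw [ih]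
    have hh : (PySem.List.insertBy before a acc).head? =
        (match acc.head? with
         | none => some a
         | some h => if before a h then some a else some h) := by
      cases acc with
      | nil => rfl
      | cons y t => rw [pvHead_insertBy]; simp
    rw [List.foldl_cons, hh]

theorem pvHead_sorted_rev {α : Type} (l : List α) (s : α → Int) :
    (PySem.List.sorted l (fun x => s x) true).head? = pvFM s l := by
  rw [PySem.List.sorted_rev_eq_foldl_insertBy, pvHead_foldl_insertBy]
  show _ = l.foldl (pvFMstep s) none
  congr 1
  funext b x
  cases b with
  | none => rfl
  | some c => simp only [pvFMstep, decide_eq_true_eq]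

def pvDict (languages : List String) (preference : List Int) : PySem.Dict String Int :=
  (languages.zip preference).foldl (fun d p => d.insert p.1 p.2) PySem.Dict.empty

theorem pvDict_eq (languages : List String) (preference : List Int)
    (h : languages.length ≤ preference.length) :
    (PySem.List.pyRange 0 (languages.length : Int) 1).foldl
      (fun d i => d.insert (PySem.List.pyGetD languages i "") (PySem.List.pyGetD preference i 0))
      PySem.Dict.empty = pvDict languages preference := by
  unfold pvDict
  suffices H : ∀ (la : List String) (pf : List Int) (d : PySem.Dict String Int),
      la.length ≤ pf.length →
      (List.range la.length).foldl
        (fun d n => d.insert (la.getD n "") (pf.getD n 0)) d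
      = (la.zip pf).foldl (fun d p => d.insert p.1 p.2) d by
    have := H languages preference PySem.Dict.empty h
    rw [← this]
    rw [PySem.List.pyRange_one, List.foldl_map]
    simp
  intro la
  induction la with
  | nil => intro pf d _; rfl
  | cons a la ih =>
    intro pf d hlen
    cases pf with
    | nil => simp at hlen
    | cons b pf =>
      rw [List.length_cons, List.range_succ_eq_map, List.foldl_cons, List.foldl_map]
      simp only [List.getD_cons_zero, List.getD_cons_succ, Nat.succ_eq_add_one]
      rw [ih pf _ (by simpa using hlen)]
      rfl

theorem pvDict_contains (languages : List String) (preference : List Int)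
    (h : languages.length ≤ preference.length) (t : String) :
    ((pvDict languages preference).contains t = true) ↔ t ∈ languages := by
  unfold pvDict
  rw [PySem.Dict.contains_iff_mem_keys]
  rw [PySem.Dict.keys_foldl_insert_key (languages.zip preference) (fun p => p.1) (fun _ p => p.2)]
  rw [PySem.Dict.keys_empty, PySem.Set.update_nil_left]
  rw [List.map_fst_zip h]
  exact PySem.Set.mem_ofList languages t

def pvAstep (languages : List String) (pd : PySem.Dict String Int) :
    PySem.Dict String Int × String → Int × String → PySem.Dict String Int × String :=
  fun st iv =>
    if iv.1 = 0 then (st.1.insert iv.2 0, iv.2)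
    else if iv.2 ∈ languages then
      (st.1.insert st.2 (st.1.getD st.2 0 + pd.getD iv.2 0 * (6 - iv.1)), st.2)
    else st

def pvBstepTot (pd : PySem.Dict String Int) : Int → Int × String → Int :=
  fun tot it => if pd.contains it.2 then tot + pd.getD it.2 0 * (6 - it.1) else tot

theorem pvInner (languages : List String) (pd : PySem.Dict String Int)
    (hcont : ∀ v, (pd.contains v = true) ↔ v ∈ languages)
    (rest : List String) :
    ∀ (j : Int), 1 ≤ j → ∀ (d : PySem.Dict String Int) (name : String) (acc : Int),
    (PySem.List.enumerate rest j).foldl (pvAstep languages pd) (d.insert name acc, name)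
      = (d.insert name ((PySem.List.enumerate rest j).foldl (pvBstepTot pd) acc), name) := by
  induction rest with
  | nil => intro j hj d name acc; rfl
  | cons t rest ih =>
    intro j hj d name acc
    rw [PySem.List.enumerate_cons, List.foldl_cons, List.foldl_cons]
    have hj0 : ¬ (j = 0) := by omega
    by_cases hmem : t ∈ languages
    · have hc : pd.contains t = true := (hcont t).mpr hmem
      simp only [pvAstep, pvBstepTot, hj0, hmem, hc, if_true, if_false, if_pos, ite_true]
      rw [PySem.Dict.getD_insert_self, PySem.Dict.insert_insert_self]
      exact ih (j + 1) (by omega) d name _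
    · have hc : pd.contains t = false := by
        rcases Bool.eq_false_or_eq_true (pd.contains t) with h | h
        · exact absurd ((hcont t).mp h) hmem
        · exact h
      simp only [pvAstep, pvBstepTot, hj0, hmem, hc, if_false, ite_false]
      exact ih (j + 1) (by omega) d name acc

theorem pvOuter (languages : List String) (pd : PySem.Dict String Int)
    (hcont : ∀ v, (pd.contains v = true) ↔ v ∈ languages)
    (table : List String) :
    ∀ (d : PySem.Dict String Int) (lang : String),
    (table.foldl (fun st tab =>
        (PySem.List.enumerate (PySem.Str.split₀ tab) 0).foldl (pvAstep languages pd) st) (d, lang)).1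
      = table.foldl (fun sc row =>
          match PySem.Str.split₀ row with
          | [] => sc
          | name :: rest =>
            sc.insert name ((PySem.List.enumerate rest 1).foldl (pvBstepTot pd) 0)) d := by
  induction table with
  | nil => intro d lang; rfl
  | cons tab table ih =>
    intro d lang
    rw [List.foldl_cons, List.foldl_cons]
    rcases hsp : PySem.Str.split₀ tab with _ | ⟨name, rest⟩
    · simp only [hsp, PySem.List.enumerate_nil, List.foldl_nil]
      exact ih d lang
    · simp only [hsp, PySem.List.enumerate_cons, List.foldl_cons]
      have h0 : pvAstep languages pd (d, lang) (0, name) = (d.insert name 0, name) := by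
        simp [pvAstep]
      rw [h0, show (0 : Int) + 1 = 1 from rfl, pvInner languages pd hcont rest 1 (by omega) d name 0]
      exact ih _ _

def pvEnc (c : String × Int) : (Int × String) × String := ((-c.2, pvKeyRep c.1), c.1)

theorem pvBfold (l : List (String × Int)) :
    ∀ (b : Option (String × Int)),
    l.foldl (fun b p =>
      match b with
      | none => some ((-p.2, pvKeyRep p.1), p.1)
      | some ((bs, bk), bn) =>
        if -p.2 < bs ∨ (-p.2 = bs ∧ pvKeyRep p.1 < bk) then some ((-p.2, pvKeyRep p.1), p.1)
        else some ((bs, bk), bn)) (b.map pvEnc)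
      = (l.foldl (pvPKstep (fun p => p.2) (fun p => pvKeyRep p.1)) b).map pvEnc := by
  induction l with
  | nil => intro b; rfl
  | cons x l ih =>
    intro b
    rw [List.foldl_cons, List.foldl_cons]
    have hstep : (match b.map pvEnc with
      | none => some ((-x.2, pvKeyRep x.1), x.1)
      | some ((bs, bk), bn) =>
        if -x.2 < bs ∨ (-x.2 = bs ∧ pvKeyRep x.1 < bk) then some ((-x.2, pvKeyRep x.1), x.1)
        else some ((bs, bk), bn))
        = (pvPKstep (fun p => p.2) (fun p => pvKeyRep p.1) b x).map pvEnc := by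
      cases b with
      | none => rfl
      | some c =>
        simp only [Option.map_some, pvEnc, pvPKstep, neg_lt_neg_iff, neg_inj]
        split_ifs <;> rfl
    rw [hstep, ih]

theorem pvFinal (table languages : List String) (preference : List Int)
    (hlen : languages.length ≤ preference.length) :
    solution table languages preference = solution_alt table languages preference := by
  unfold solution solution_alt
  simp only []
  rw [pvDict_eq languages preference hlen]
  have hcont := pvDict_contains languages preference hlen
  have hout := pvOuter languages (pvDict languages preference) hcont table PySem.Dict.empty ""
  rw [show (fun (st : PySem.Dict String Int × String) (iv : Int × String) =>
        if iv.1 = 0 then (st.1.insert iv.2 0, iv.2)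
        else if iv.2 ∈ languages then
          (st.1.insert st.2 (st.1.getD st.2 0 + (pvDict languages preference).getD iv.2 0 * (6 - iv.1)), st.2)
        else st) = pvAstep languages (pvDict languages preference) from rfl] at *
  rw [show List.foldl (fun (d : PySem.Dict String Int) (p : String × Int) => d.insert p.1 p.2)
        PySem.Dict.empty (languages.zip preference) = pvDict languages preference from rfl]
  rw [show (fun (tot : Int) (it : Int × String) =>
        if (pvDict languages preference).contains it.2 then
          tot + (pvDict languages preference).getD it.2 0 * (6 - it.1)
        else tot) = pvBstepTot (pvDict languages preference) from rfl]
  rw [hout]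
  -- name the scores dict items
  set items := (table.foldl (fun sc row =>
      match PySem.Str.split₀ row with
      | [] => sc
      | name :: rest =>
        sc.insert name ((PySem.List.enumerate rest 1).foldl (pvBstepTot (pvDict languages preference)) 0)) PySem.Dict.empty).items with hitems
  have hA : (match PySem.List.sorted (PySem.List.sorted items (fun x => pvKeyRep x.1) false) (fun x => x.2) true with
      | [] => ""
      | p :: _ => p.1)
      = (match pvFM (fun p : String × Int => p.2) (PySem.List.sorted items (fun x => pvKeyRep x.1) false) with
      | none => ""
      | some p => p.1) := by
    rw [← pvHead_sorted_rev (PySem.List.sorted items (fun x => pvKeyRep x.1) false) (fun p : String × Int => p.2)]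
    cases PySem.List.sorted (PySem.List.sorted items (fun x => pvKeyRep x.1) false) (fun x => x.2) true <;> rfl
  rw [hA, pvMain (fun p : String × Int => p.2) (fun p => pvKeyRep p.1) items]
  have hB := pvBfold items none
  simp only [Option.map_none] at hB
  rw [hB]
  cases items.foldl (pvPKstep (fun p : String × Int => p.2) (fun p => pvKeyRep p.1)) none <;> rfl

-- ===== VERDICT (by name: the statement is the Claim_ definition above) =====
theorem solution_spec : Claim_equal_solution := by
  unfold Claim_equal_solution
  intro table languages preference _ hpre
  unfold Spec_solution
  exact pvFinal table languages preference hpre.1
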